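-- pv_equiv track=rewrite | github.com/Scienthusiast/answer_validation | python/is_valid_answer.py | is_unknown_left
-- ===== SOURCE A (Python) =====
-- def is_unknown_left(sequence):
-- 	equal_found = False
-- 	for term in sequence:
-- 		if term == "?":
-- 			return not equal_found
-- 		if term == "=":
-- 			equal_found = True
-- 	#no unknown => invalid sequence, should be error
-- 	return False
-- ===== SOURCE B (Python) =====
-- def is_unknown_left(sequence):
-- 	if "?" not in sequence:
-- 		return False
-- 	if "=" not in sequence:
-- 		return True
-- 	return sequence.index("?") < sequence.index("=")
-- ===== Notes on version B (the rewrite author's own statement) =====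
-- stated objective: alternative
-- what changed: B replaces A's single flag-carrying early-exit scan by staged lookups: membership tests for '?' and '=', then a comparison of their first-occurrence indices.
import Mathlib
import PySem

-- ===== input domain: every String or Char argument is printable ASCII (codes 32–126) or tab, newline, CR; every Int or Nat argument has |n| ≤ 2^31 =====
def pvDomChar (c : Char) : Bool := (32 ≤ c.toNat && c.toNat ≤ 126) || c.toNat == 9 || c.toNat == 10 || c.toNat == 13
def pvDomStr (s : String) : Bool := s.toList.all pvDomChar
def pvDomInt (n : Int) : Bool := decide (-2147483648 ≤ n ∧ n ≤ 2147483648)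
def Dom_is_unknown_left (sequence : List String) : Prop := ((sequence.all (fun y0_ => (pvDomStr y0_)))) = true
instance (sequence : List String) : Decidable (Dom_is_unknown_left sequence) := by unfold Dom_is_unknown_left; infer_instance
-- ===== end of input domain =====

-- B replaces A's flag-carrying early-exit scan by staged membership tests and a first-index comparison: alternative decomposition.


-- ===== PORT A =====
-- A: loop carrying the equal_found flag; on "?" return (not flag), on "=" set flag; False at end.
def is_unknown_left_loop (equal_found : Bool) : List String → Bool
  | [] => false
  | term :: rest =>
    if term == "?" then !equal_found
    else if term == "=" then is_unknown_left_loop true rest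
    else is_unknown_left_loop equal_found rest

def is_unknown_left (sequence : List String) : Bool :=
  is_unknown_left_loop false sequence

-- ===== PORT B =====
-- B: staged lookups — no "?" ⇒ False; no "=" ⇒ True; else compare first indices.
def is_unknown_left_alt (sequence : List String) : Bool :=
  if !sequence.contains "?" then false
  else if !sequence.contains "=" then true
  else
    match PySem.List.index? sequence "?", PySem.List.index? sequence "=" with
    | some i, some j => decide (i < j)
    | _, _ => false

-- ===== PRECONDITION & SPEC =====
def Spec_is_unknown_left (sequence : List String) (out : Bool) : Prop := out = is_unknown_left_alt sequence
instance (sequence : List String) (out : Bool) : Decidable (Spec_is_unknown_left sequence out) := by unfold Spec_is_unknown_left; infer_instance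

-- ===== CLAIM (what is proved, stated in full; the proofs are below) =====
def Claim_equal_is_unknown_left : Prop := ∀ (sequence : List String), Dom_is_unknown_left sequence → Spec_is_unknown_left sequence (is_unknown_left sequence)

-- ===== LEMMAS AND PROOFS =====
lemma loop_true_false (sequence : List String) : is_unknown_left_loop true sequence = false := by
  induction sequence with
  | nil => rfl
  | cons t rest ih =>
    by_cases hq : t = "?"
    · subst hq; simp [is_unknown_left_loop]
    · by_cases he : t = "="
      · subst he; simpa [is_unknown_left_loop] using ih
      · simpa [is_unknown_left_loop, hq, he] using ih

lemma loop_false_eq_alt (sequence : List String) :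
    is_unknown_left_loop false sequence = is_unknown_left_alt sequence := by
  induction sequence with
  | nil => rfl
  | cons t rest ih =>
    by_cases hq : t = "?"
    · subst hq
      by_cases he : ("=" : String) ∈ rest
      · have hne : List.idxOf? ("=" : String) rest ≠ none := by
          simpa [List.idxOf?_eq_none_iff] using he
        rcases h : List.idxOf? ("=" : String) rest with _ | j
        · exact absurd h hne
        · simp [is_unknown_left_alt, is_unknown_left_loop,
            PySem.List.index?_eq_idxOf?, List.idxOf?_cons, he, h]
      · simp [is_unknown_left_alt, is_unknown_left_loop, he]
    · by_cases he : t = "="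
      · subst he
        have hl : is_unknown_left_loop false ("=" :: rest) = false := by
          simpa [is_unknown_left_loop] using loop_true_false rest
        rw [hl]
        by_cases hqr : ("?" : String) ∈ rest
        · have hne : List.idxOf? ("?" : String) rest ≠ none := by
            simpa [List.idxOf?_eq_none_iff] using hqr
          rcases h : List.idxOf? ("?" : String) rest with _ | i
          · exact absurd h hne
          · simp [is_unknown_left_alt, PySem.List.index?_eq_idxOf?, List.idxOf?_cons, hqr, h]
        · simp [is_unknown_left_alt, hqr]
      · have hl : is_unknown_left_loop false (t :: rest) = is_unknown_left_loop false rest := by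
          simp [is_unknown_left_loop, hq, he]
        rw [hl, ih]
        have h1 : (t == ("?" : String)) = false := by simp [hq]
        have h2 : (t == ("=" : String)) = false := by simp [he]
        have h3 : ¬ ("?" : String) = t := fun h => hq h.symm
        have h4 : ¬ ("=" : String) = t := fun h => he h.symm
        simp only [is_unknown_left_alt, PySem.List.index?_eq_idxOf?, List.idxOf?_cons,
          List.contains_cons, h1, h2]
        rcases List.idxOf? ("?" : String) rest with _ | i <;>
          rcases List.idxOf? ("=" : String) rest with _ | j <;>
            simp [h3, h4]

-- ===== VERDICT (by name: the statement is the Claim_ definition above) =====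
theorem is_unknown_left_spec : Claim_equal_is_unknown_left := by
  intro sequence _
  unfold Spec_is_unknown_left is_unknown_left
  exact loop_false_eq_alt sequence
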